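-- pv_equiv track=rewrite | github.com/happy96026/interview-prep | coding-problem/feb/feb11.py | getFarthest
-- ===== SOURCE A (Python) =====
-- def getFarthest(arr, target, i, left=True):
--   j = len(arr)
--   while i < j:
--     m = (i + j) // 2
--     if arr[m] > target or (left and arr[m] == target): j = m
--     else: i = m + 1
--
--   if not left: i -= 1
--   if i < len(arr) and arr[i] == target: return i
--   return -1
-- ===== SOURCE B (Python) =====
-- def getFarthest(arr, target, i, left=True):
--   def lower_bound(lo, hi):
--     if lo >= hi:
--       return lo
--     m = (lo + hi) // 2
--     return lower_bound(lo, m) if arr[m] >= target else lower_bound(m + 1, hi)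
--
--   def upper_bound(lo, hi):
--     if lo >= hi:
--       return lo
--     m = (lo + hi) // 2
--     return upper_bound(lo, m) if arr[m] > target else upper_bound(m + 1, hi)
--
--   idx = lower_bound(i, len(arr)) if left else upper_bound(i, len(arr)) - 1
--   return idx if idx < len(arr) and arr[idx] == target else -1
-- ===== Notes on version B (the rewrite author's own statement) =====
-- stated objective: alternative
-- what changed: A's single mutating while-loop with a combined branch condition is replaced by two purely functional recursive helpers lower_bound/upper_bound (the condition split per direction) selected by `left`, with the result composed in one expression instead of in-place index mutation.
-- outside the precondition, e.g. on getFarthest([5], 5, -1, False): A returns 0, B returns 0; on getFarthest([-3, -1, 2], 3, -8, True): A returns -1, B returns -1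
import Mathlib
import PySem

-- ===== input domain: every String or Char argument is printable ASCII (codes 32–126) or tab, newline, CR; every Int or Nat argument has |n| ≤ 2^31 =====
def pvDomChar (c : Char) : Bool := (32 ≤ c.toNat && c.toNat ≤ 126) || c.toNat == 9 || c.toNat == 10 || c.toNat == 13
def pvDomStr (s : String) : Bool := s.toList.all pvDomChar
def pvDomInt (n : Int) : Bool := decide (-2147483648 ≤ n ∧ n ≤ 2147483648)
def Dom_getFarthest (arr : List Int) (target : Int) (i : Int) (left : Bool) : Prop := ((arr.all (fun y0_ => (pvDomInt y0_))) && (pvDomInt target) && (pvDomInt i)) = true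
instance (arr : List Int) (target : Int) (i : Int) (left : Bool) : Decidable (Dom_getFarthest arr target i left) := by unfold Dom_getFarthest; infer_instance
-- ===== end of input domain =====

-- B replaces A's single mutating while-loop (with its combined branch condition) by two
-- purely functional recursive helpers lower_bound/upper_bound selected by `left` (objective: alternative).

-- ===== PORT A =====
-- the while loop of A, state (i, j); arr[m] is pyGetD (the out-of-range IndexError inputs are outside Pre_)
def getFarthestLoopA (arr : List Int) (target : Int) (left : Bool) (i j : Int) : Int :=
  if hij : i < j then
    let m := PySem.Int.floordiv (i + j) 2
    if PySem.List.pyGetD arr m 0 > target ∨ (left = true ∧ PySem.List.pyGetD arr m 0 = target) then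
      getFarthestLoopA arr target left i m
    else
      getFarthestLoopA arr target left (m + 1) j
  else i
termination_by (j - i).toNat
decreasing_by
  · have h1 := PySem.Int.floordiv_two_mid_bounds (le_of_lt hij)
    have h2 : PySem.Int.floordiv (i + j) 2 < j :=
      (PySem.Int.floordiv_lt_iff_lt_mul (a := i + j) (b := 2) (q := j) (by omega)).mpr (by omega)
    omega
  · have h1 := PySem.Int.floordiv_two_mid_bounds (le_of_lt hij)
    omega

def getFarthest (arr : List Int) (target : Int) (i : Int) (left : Bool) : Int :=
  let i1 := getFarthestLoopA arr target left i (arr.length : Int)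
  let i2 := if left = true then i1 else i1 - 1
  if i2 < (arr.length : Int) ∧ PySem.List.pyGetD arr i2 0 = target then i2 else -1

-- ===== PORT B =====
def lowerBoundB (arr : List Int) (target : Int) (lo hi : Int) : Int :=
  if hlh : lo ≥ hi then lo
  else
    let m := PySem.Int.floordiv (lo + hi) 2
    if PySem.List.pyGetD arr m 0 ≥ target then lowerBoundB arr target lo m
    else lowerBoundB arr target (m + 1) hi
termination_by (hi - lo).toNat
decreasing_by
  · have h1 := PySem.Int.floordiv_two_mid_bounds (le_of_lt (by omega : lo < hi))
    have h2 : PySem.Int.floordiv (lo + hi) 2 < hi :=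
      (PySem.Int.floordiv_lt_iff_lt_mul (a := lo + hi) (b := 2) (q := hi) (by omega)).mpr (by omega)
    omega
  · have h1 := PySem.Int.floordiv_two_mid_bounds (le_of_lt (by omega : lo < hi))
    omega

def upperBoundB (arr : List Int) (target : Int) (lo hi : Int) : Int :=
  if hlh : lo ≥ hi then lo
  else
    let m := PySem.Int.floordiv (lo + hi) 2
    if PySem.List.pyGetD arr m 0 > target then upperBoundB arr target lo m
    else upperBoundB arr target (m + 1) hi
termination_by (hi - lo).toNat
decreasing_by
  · have h1 := PySem.Int.floordiv_two_mid_bounds (le_of_lt (by omega : lo < hi))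
    have h2 : PySem.Int.floordiv (lo + hi) 2 < hi :=
      (PySem.Int.floordiv_lt_iff_lt_mul (a := lo + hi) (b := 2) (q := hi) (by omega)).mpr (by omega)
    omega
  · have h1 := PySem.Int.floordiv_two_mid_bounds (le_of_lt (by omega : lo < hi))
    omega

def getFarthest_alt (arr : List Int) (target : Int) (i : Int) (left : Bool) : Int :=
  let idx := if left = true then lowerBoundB arr target i (arr.length : Int)
             else upperBoundB arr target i (arr.length : Int) - 1
  if idx < (arr.length : Int) ∧ PySem.List.pyGetD arr idx 0 = target then idx else -1

-- ===== PRECONDITION & SPEC =====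
-- Pre_ excludes exactly the start indices i below -len(arr) (below 1-len(arr) when left is False,
-- whose final i-1 access can reach arr[-len-1]): there A (and B alike) raises IndexError or not
-- depending on the array contents, so no closed-form shape condition separates the two; cited examples
-- where both still return are in claim.json.
def Pre_getFarthest (arr : List Int) (target : Int) (i : Int) (left : Bool) : Prop :=
  (if left then (0 : Int) else 1) - (arr.length : Int) ≤ i
instance (arr : List Int) (target : Int) (i : Int) (left : Bool) : Decidable (Pre_getFarthest arr target i left) := by unfold Pre_getFarthest; infer_instance

def pvWitness_getFarthest : List Int × Int × Int × Bool := ([1, 2, 2, 3], 2, 0, true)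

def Spec_getFarthest (arr : List Int) (target : Int) (i : Int) (left : Bool) (out : Int) : Prop := out = getFarthest_alt arr target i left
instance (arr : List Int) (target : Int) (i : Int) (left : Bool) (out : Int) : Decidable (Spec_getFarthest arr target i left out) := by unfold Spec_getFarthest; infer_instance

-- ===== CLAIM (what is proved, stated in full; the proofs are below) =====
def Claim_equal_getFarthest : Prop := ∀ (arr : List Int) (target : Int) (i : Int) (left : Bool), Dom_getFarthest arr target i left → Pre_getFarthest arr target i left → Spec_getFarthest arr target i left (getFarthest arr target i left)

-- ===== LEMMAS AND PROOFS =====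

theorem loopA_left (arr : List Int) (target : Int) : ∀ (n : Nat) (i j : Int), (j - i).toNat ≤ n →
    getFarthestLoopA arr target true i j = lowerBoundB arr target i j := by
  intro n
  induction n with
  | zero =>
    intro i j h
    rw [getFarthestLoopA, lowerBoundB, dif_neg (show ¬ i < j by omega), dif_pos (show i ≥ j by omega)]
  | succ n ih =>
    intro i j h
    rw [getFarthestLoopA, lowerBoundB]
    by_cases hij : i < j
    · have hm := PySem.Int.floordiv_two_mid_bounds (le_of_lt hij)
      have hm2 : PySem.Int.floordiv (i + j) 2 < j :=
        (PySem.Int.floordiv_lt_iff_lt_mul (a := i + j) (b := 2) (q := j) (by omega)).mpr (by omega)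
      rw [dif_pos hij, dif_neg (show ¬ i ≥ j by omega)]
      by_cases hc : PySem.List.pyGetD arr (PySem.Int.floordiv (i + j) 2) 0 ≥ target
      · rw [if_pos (show _ ∨ (true = true ∧ _) by
            rcases lt_or_eq_of_le hc with h1 | h1
            · exact Or.inl h1
            · exact Or.inr ⟨rfl, h1.symm⟩), if_pos hc]
        exact ih i _ (by omega)
      · rw [if_neg (fun hx => hc (by rcases hx with h1 | ⟨-, h1⟩ <;> omega)), if_neg hc]
        exact ih _ j (by omega)
    · rw [dif_neg hij, dif_pos (show i ≥ j by omega)]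

theorem loopA_right (arr : List Int) (target : Int) : ∀ (n : Nat) (i j : Int), (j - i).toNat ≤ n →
    getFarthestLoopA arr target false i j = upperBoundB arr target i j := by
  intro n
  induction n with
  | zero =>
    intro i j h
    rw [getFarthestLoopA, upperBoundB, dif_neg (show ¬ i < j by omega), dif_pos (show i ≥ j by omega)]
  | succ n ih =>
    intro i j h
    rw [getFarthestLoopA, upperBoundB]
    by_cases hij : i < j
    · have hm := PySem.Int.floordiv_two_mid_bounds (le_of_lt hij)
      have hm2 : PySem.Int.floordiv (i + j) 2 < j :=
        (PySem.Int.floordiv_lt_iff_lt_mul (a := i + j) (b := 2) (q := j) (by omega)).mpr (by omega)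
      rw [dif_pos hij, dif_neg (show ¬ i ≥ j by omega)]
      by_cases hc : PySem.List.pyGetD arr (PySem.Int.floordiv (i + j) 2) 0 > target
      · rw [if_pos (Or.inl hc), if_pos hc]
        exact ih i _ (by omega)
      · rw [if_neg (fun hx => hx.elim hc (fun h1 => Bool.false_ne_true h1.1)), if_neg hc]
        exact ih _ j (by omega)
    · rw [dif_neg hij, dif_pos (show i ≥ j by omega)]

-- ===== VERDICT (by name: the statement is the Claim_ definition above) =====
theorem getFarthest_spec : Claim_equal_getFarthest := by
  intro arr target i left _ _
  unfold Spec_getFarthest getFarthest getFarthest_alt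
  cases left with
  | true => rw [loopA_left arr target ((arr.length : Int) - i).toNat i _ (le_refl _)]; simp
  | false => rw [loopA_right arr target ((arr.length : Int) - i).toNat i _ (le_refl _)]; simp
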